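-- pv_equiv track=rewrite | github.com/tovtechologies-cpu/voice_bot | backend/services/translation.py | detect_language_extended
-- ===== SOURCE A (Python) =====
-- def detect_language_extended(text: str) -> str:
--     """Extended language detection supporting 7 languages."""
--     text_lower = text.lower().strip()
--
--     # Wolof markers
--     wolof_words = ["nanga", "def", "jere", "jef", "baal", "ma", "nekk", "dem", "naa", "lii",
--                    "yow", "man", "jang", "ndax", "waaw", "deedeet", "ana", "nii", "dinaa",
--                    "xam", "benn", "juroom", "nett", "nyaar"]
--     # Fon markers
--     fon_words = ["mi", "nyi", "kudo", "ka", "do", "wE", "gbE", "nado", "a ni", "daxo",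
--                  "alo", "azOn", "kpOn", "towe", "enyi", "e", "nukunnu", "hounnon", "avion"]
--     # Yoruba markers
--     yoruba_words = ["bawo", "emi", "iwo", "oun", "awa", "se", "ko", "ni", "ati", "fun",
--                     "mo", "fe", "lo", "wa", "gba", "beeni", "rara", "jowo", "ekaaro",
--                     "ekasan", "ekaale", "pele"]
--     # Hausa markers
--     hausa_words = ["ina", "yaya", "kuna", "wane", "suna", "zai", "kai", "ke", "shi", "ta",
--                    "mun", "da", "zuwa", "na", "gida", "rana", "sannu", "nagode", "tashi",
--                    "zo", "tafi", "jirgi"]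
--     # Swahili markers
--     swahili_words = ["habari", "jambo", "karibu", "asante", "tafadhali", "ndio", "hapana",
--                      "nataka", "kwenda", "kuruka", "ndege", "safari", "leo", "kesho",
--                      "nina", "sawa", "nzuri", "bwana", "mama"]
--     # French markers
--     french_words = ["je", "veux", "aller", "pour", "le", "la", "un", "une", "merci",
--                     "bonjour", "oui", "non", "vol", "billet", "avion", "partir", "reservation"]
--     # English markers
--     english_words = ["i", "want", "to", "go", "the", "a", "please", "hello", "yes", "no",
--                      "flight", "ticket", "book", "travel", "departure"]
--
--     def score(words):
--         return sum(1 for w in words if f" {w} " in f" {text_lower} " or text_lower == w or text_lower.startswith(w + " "))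
--
--     scores = {
--         "wo": score(wolof_words),
--         "fon": score(fon_words),
--         "yo": score(yoruba_words),
--         "ha": score(hausa_words),
--         "sw": score(swahili_words),
--         "fr": score(french_words),
--         "en": score(english_words),
--     }
--
--     best = max(scores, key=scores.get)
--     if scores[best] == 0:
--         # No markers detected — default to French
--         return "fr"
--     return best
-- ===== SOURCE B (Python) =====
-- def detect_language_extended(text: str) -> str:
--     """Extended language detection supporting 7 languages."""
--     text_lower = text.lower().strip()
--
--     markers = [
--         ("wo", ["nanga", "def", "jere", "jef", "baal", "ma", "nekk", "dem", "naa", "lii",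
--                 "yow", "man", "jang", "ndax", "waaw", "deedeet", "ana", "nii", "dinaa",
--                 "xam", "benn", "juroom", "nett", "nyaar"]),
--         ("fon", ["mi", "nyi", "kudo", "ka", "do", "wE", "gbE", "nado", "a ni", "daxo",
--                  "alo", "azOn", "kpOn", "towe", "enyi", "e", "nukunnu", "hounnon", "avion"]),
--         ("yo", ["bawo", "emi", "iwo", "oun", "awa", "se", "ko", "ni", "ati", "fun",
--                 "mo", "fe", "lo", "wa", "gba", "beeni", "rara", "jowo", "ekaaro",
--                 "ekasan", "ekaale", "pele"]),
--         ("ha", ["ina", "yaya", "kuna", "wane", "suna", "zai", "kai", "ke", "shi", "ta",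
--                 "mun", "da", "zuwa", "na", "gida", "rana", "sannu", "nagode", "tashi",
--                 "zo", "tafi", "jirgi"]),
--         ("sw", ["habari", "jambo", "karibu", "asante", "tafadhali", "ndio", "hapana",
--                 "nataka", "kwenda", "kuruka", "ndege", "safari", "leo", "kesho",
--                 "nina", "sawa", "nzuri", "bwana", "mama"]),
--         ("fr", ["je", "veux", "aller", "pour", "le", "la", "un", "une", "merci",
--                 "bonjour", "oui", "non", "vol", "billet", "avion", "partir", "reservation"]),
--         ("en", ["i", "want", "to", "go", "the", "a", "please", "hello", "yes", "no",
--                 "flight", "ticket", "book", "travel", "departure"]),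
--     ]
--
--     # Inverted index: single-word marker -> language codes; multi-word markers kept as phrases.
--     word_pairs = [(w, code) for code, words in markers for w in words if " " not in w]
--     phrase_pairs = [(code, w) for code, words in markers for w in words if " " in w]
--     index = {}
--     for w, code in word_pairs:
--         index.setdefault(w, []).append(code)
--
--     scores = {code: 0 for code, _ in markers}
--     for tok in set(text_lower.split(" ")):
--         for code in index.get(tok, ()):
--             scores[code] += 1
--
--     padded = " " + text_lower + " "
--     for code, phrase in phrase_pairs:
--         if " " + phrase + " " in padded:
--             scores[code] += 1
--
--     best = max(scores, key=scores.get)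
--     return best if scores[best] else "fr"
-- ===== Notes on version B (the rewrite author's own statement) =====
-- stated objective: faster
-- what changed: Instead of 7 per-language score() passes that substring-scan the padded text once per marker word (118 scans), B tokenizes the text once on single spaces into a set, looks each distinct token up in one prebuilt word-to-languages inverted index, and handles the lone multi-word Fon marker phrase with a single explicit padded-substring check.
import Mathlib
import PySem

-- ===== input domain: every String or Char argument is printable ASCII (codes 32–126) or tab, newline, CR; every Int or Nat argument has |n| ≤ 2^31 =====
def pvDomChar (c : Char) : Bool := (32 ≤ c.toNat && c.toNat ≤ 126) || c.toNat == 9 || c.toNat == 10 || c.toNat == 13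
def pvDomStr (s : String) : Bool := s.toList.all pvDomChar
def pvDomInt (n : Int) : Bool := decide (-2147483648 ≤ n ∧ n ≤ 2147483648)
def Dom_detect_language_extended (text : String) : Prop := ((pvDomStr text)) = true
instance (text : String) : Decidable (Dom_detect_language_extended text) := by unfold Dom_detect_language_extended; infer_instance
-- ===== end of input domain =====

-- B is a restructured exact re-implementation: one inverted word→languages index over a token set
-- (single-space tokenization) instead of A's 7 per-language substring scans; same return value.

-- ===== PORT A =====
-- the marker word lists (shared literal data of both Pythons)
def wolofWords : List String := ["nanga", "def", "jere", "jef", "baal", "ma", "nekk", "dem", "naa", "lii",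
  "yow", "man", "jang", "ndax", "waaw", "deedeet", "ana", "nii", "dinaa",
  "xam", "benn", "juroom", "nett", "nyaar"]
def fonWords : List String := ["mi", "nyi", "kudo", "ka", "do", "wE", "gbE", "nado", "a ni", "daxo",
  "alo", "azOn", "kpOn", "towe", "enyi", "e", "nukunnu", "hounnon", "avion"]
def yorubaWords : List String := ["bawo", "emi", "iwo", "oun", "awa", "se", "ko", "ni", "ati", "fun",
  "mo", "fe", "lo", "wa", "gba", "beeni", "rara", "jowo", "ekaaro", "ekasan", "ekaale", "pele"]
def hausaWords : List String := ["ina", "yaya", "kuna", "wane", "suna", "zai", "kai", "ke", "shi", "ta",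
  "mun", "da", "zuwa", "na", "gida", "rana", "sannu", "nagode", "tashi", "zo", "tafi", "jirgi"]
def swahiliWords : List String := ["habari", "jambo", "karibu", "asante", "tafadhali", "ndio", "hapana",
  "nataka", "kwenda", "kuruka", "ndege", "safari", "leo", "kesho", "nina", "sawa", "nzuri", "bwana", "mama"]
def frenchWords : List String := ["je", "veux", "aller", "pour", "le", "la", "un", "une", "merci",
  "bonjour", "oui", "non", "vol", "billet", "avion", "partir", "reservation"]
def englishWords : List String := ["i", "want", "to", "go", "the", "a", "please", "hello", "yes", "no",
  "flight", "ticket", "book", "travel", "departure"]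

-- A's per-word test:  f" {w} " in f" {text_lower} " or text_lower == w or text_lower.startswith(w + " ")
def aCond (tl w : String) : Bool :=
  PySem.Str.isIn (" " ++ w ++ " ") (" " ++ tl ++ " ") || tl == w || PySem.Str.startswith tl (w ++ " ")

-- A's score(words) = sum(1 for w in words if …)
def aScore (tl : String) (words : List String) : Int :=
  (words.map (fun w => if aCond tl w then (1 : Int) else 0)).sum

-- the scores dict literal of A (insertion order wo, fon, yo, ha, sw, fr, en)
def aScores (tl : String) : PySem.Dict String Int :=
  ⟨[("wo", aScore tl wolofWords), ("fon", aScore tl fonWords), ("yo", aScore tl yorubaWords),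
    ("ha", aScore tl hausaWords), ("sw", aScore tl swahiliWords), ("fr", aScore tl frenchWords),
    ("en", aScore tl englishWords)]⟩

def detect_language_extended (text : String) : String :=
  let tl := PySem.Str.strip (PySem.Str.lower text)
  -- best = max(scores, key=scores.get); all keys are present, so scores.get k = scores.getD k 0
  match PySem.List.max? (aScores tl).keys (fun k => (aScores tl).getD k 0) with
  | some best => if (aScores tl).getD best 0 = 0 then "fr" else best
  | none => "fr"  -- unreachable: the key list is the nonempty literal above

-- ===== PORT B =====
def langMarkers : List (String × List String) :=
  [("wo", wolofWords), ("fon", fonWords), ("yo", yorubaWords), ("ha", hausaWords),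
   ("sw", swahiliWords), ("fr", frenchWords), ("en", englishWords)]

-- word_pairs = [(w, code) for code, words in markers for w in words if " " not in w]
def bWordPairs : List (String × String) :=
  langMarkers.flatMap (fun cw => (cw.2.filter (fun w => !PySem.Str.isIn " " w)).map (fun w => (w, cw.1)))

-- phrase_pairs = [(code, w) for code, words in markers for w in words if " " in w]
def bPhrasePairs : List (String × String) :=
  langMarkers.flatMap (fun cw => (cw.2.filter (fun w => PySem.Str.isIn " " w)).map (fun w => (cw.1, w)))

-- index: for w, code in word_pairs: index.setdefault(w, []).append(code)
def bIndex : PySem.Dict String (List String) :=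
  bWordPairs.foldl (fun d p => d.modify p.1 [] (fun cs => cs ++ [p.2])) PySem.Dict.empty

-- scores = {code: 0 for code, _ in markers}
def bScores0 : PySem.Dict String Int :=
  langMarkers.foldl (fun d cw => d.insert cw.1 0) PySem.Dict.empty

-- set(text_lower.split(" "))  (sep " " ≠ "", so split? always returns a value)
def bToks (tl : String) : PySem.Set String :=
  PySem.Set.ofList ((PySem.Str.split? tl " ").getD [])

-- for tok in token set: for code in index.get(tok, ()): scores[code] += 1
def bScores1 (tl : String) : PySem.Dict String Int :=
  List.foldl (fun d tok => List.foldl (fun d c => d.modify c 0 (fun x => x + 1)) d (bIndex.getD tok []))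
    bScores0 (bToks tl)

-- for code, phrase in phrase_pairs: if " "+phrase+" " in padded: scores[code] += 1
def bScores2 (tl : String) : PySem.Dict String Int :=
  List.foldl
    (fun d p => if PySem.Str.isIn (" " ++ p.2 ++ " ") (" " ++ tl ++ " ") then d.modify p.1 0 (fun x => x + 1) else d)
    (bScores1 tl) bPhrasePairs

def detect_language_extended_alt (text : String) : String :=
  let tl := PySem.Str.strip (PySem.Str.lower text)
  match PySem.List.max? (bScores2 tl).keys (fun k => (bScores2 tl).getD k 0) with
  | some best => if (bScores2 tl).getD best 0 = 0 then "fr" else best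
  | none => "fr"

-- ===== PRECONDITION & SPEC =====
def Spec_detect_language_extended (text : String) (out : String) : Prop := out = detect_language_extended_alt text
instance (text : String) (out : String) : Decidable (Spec_detect_language_extended text out) := by unfold Spec_detect_language_extended; infer_instance

-- ===== CLAIM (what is proved, stated in full; the proofs are below) =====
def Claim_equal_detect_language_extended : Prop := ∀ (text : String), Dom_detect_language_extended text → Spec_detect_language_extended text (detect_language_extended text)

-- ===== LEMMAS AND PROOFS =====

-- ---------- tokenization: PySem's splitOn on " " is Mathlib's List.splitOn ' ' ----------

theorem modifyHead_ne_nil_cons {α : Type} (f : List α → List α) (h : List α) (t : List (List α)) :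
    (h :: t).modifyHead f = f h :: t := rfl

theorem modifyHead_fun_id {α : Type} (l : List α) : l.modifyHead (fun h => h) = l := by cases l <;> rfl

theorem go_spec : ∀ (fuel : Nat) (l cur : List Char) (acc : List (List Char)),
    l.length < fuel →
    PySem.Chars.splitOn.go [' '] fuel l cur acc =
      acc.reverse ++ (List.splitOn ' ' l).modifyHead (fun h => cur.reverse ++ h) := by
  intro fuel
  induction fuel with
  | zero => intro l cur acc h; omega
  | succ n ih =>
    intro l cur acc h
    cases l with
    | nil =>
      simp [PySem.Chars.splitOn.go, List.splitOn, List.splitOnP_nil]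
    | cons c rest =>
      rw [PySem.Chars.splitOn.go]
      by_cases hc : c = ' '
      · subst hc
        have : [' '].isPrefixOf (' ' :: rest) = true := by simp [List.isPrefixOf]
        rw [if_pos this]
        rw [ih _ _ _ (by simpa using Nat.lt_of_succ_lt_succ h)]
        simp [List.splitOn, List.splitOnP_cons, modifyHead_fun_id]
      · rw [if_neg (by simp [List.isPrefixOf]; exact fun h => hc h.symm)]
        rw [ih _ _ _ (by simpa using Nat.lt_of_succ_lt_succ h)]
        have hsp : List.splitOn ' ' (c :: rest) = (List.splitOn ' ' rest).modifyHead (List.cons c) := by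
          simp [List.splitOn, List.splitOnP_cons, hc]
        rw [hsp]
        obtain ⟨hh, ht, he⟩ : ∃ hh ht, List.splitOn ' ' rest = hh :: ht :=
          List.exists_cons_of_ne_nil (List.splitOnP_ne_nil _ _)
        rw [he]
        simp

theorem splitOn_char (cs : List Char) : PySem.Chars.splitOn cs [' '] = List.splitOn ' ' cs := by
  rw [PySem.Chars.splitOn, go_spec _ _ _ _ (by omega)]
  obtain ⟨hh, ht, he⟩ : ∃ hh ht, List.splitOn ' ' cs = hh :: ht :=
    List.exists_cons_of_ne_nil (List.splitOnP_ne_nil _ _)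
  simp [he]

-- every field of splitOn ' ' is space-free
theorem splitOn_spaceless : ∀ (cs : List Char), ∀ f ∈ List.splitOn ' ' cs, ' ' ∉ f := by
  intro cs
  induction cs with
  | nil => intro f hf; simp [List.splitOn, List.splitOnP_nil] at hf; simp [hf]
  | cons c rest ih =>
    intro f hf
    by_cases hc : c = ' '
    · subst hc; simp [List.splitOn, List.splitOnP_cons] at hf
      rcases hf with h | h
      · simp [h]
      · exact ih f (by simpa [List.splitOn] using h)
    · simp [List.splitOn, List.splitOnP_cons, hc] at hf
      obtain ⟨hh, ht, he⟩ : ∃ hh ht, List.splitOnP (fun x => x == ' ') rest = hh :: ht :=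
        List.exists_cons_of_ne_nil (List.splitOnP_ne_nil _ _)
      rw [he] at hf
      simp [modifyHead_ne_nil_cons] at hf
      rcases hf with h | h
      · subst h
        intro hmem
        rcases List.mem_cons.mp hmem with h | h
        · exact hc h.symm
        · exact ih hh (by simp [List.splitOn, he]) h
      · exact ih f (by simp [List.splitOn, he, h])

-- ---------- " w " is an infix of " t " exactly when w is one of t's single-space fields ----------

-- prefix comparison: two space-free words ending at the first space must be equal
theorem pc : ∀ (w h X : List Char), ' ' ∉ w → ' ' ∉ h →
    (w ++ [' ']) <+: (h ++ ' ' :: X) → w = h := by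
  intro w
  induction w with
  | nil =>
    intro h X _ hh hp
    cases h with
    | nil => rfl
    | cons c h' =>
      obtain ⟨t, ht⟩ := hp
      simp at ht
      exact absurd ht.1.symm (by intro hc; exact hh (by simp [hc]))
  | cons a w' ih =>
    intro h X hw hh hp
    cases h with
    | nil =>
      obtain ⟨t, ht⟩ := hp
      simp at ht
      exact absurd ht.1 (by intro hc; exact hw (by simp [hc]))
    | cons c h' =>
      obtain ⟨t, ht⟩ := hp
      simp at ht
      obtain ⟨hac, hrest⟩ := ht
      have : w' = h' := by
        apply ih h' X (fun hm => hw (by simp [hm])) (fun hm => hh (by simp [hm]))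
        exact ⟨t, by simpa using hrest⟩
      simp [hac, this]

-- locating the first space in g ++ ' ' :: R'
theorem firstSp : ∀ (g : List Char), ' ' ∉ g → ∀ (x z R' : List Char),
    g ++ ' ' :: R' = x ++ ' ' :: z → (x = g ∧ z = R') ∨ (∃ x2, x = g ++ ' ' :: x2 ∧ x2 ++ ' ' :: z = R') := by
  intro g
  induction g with
  | nil =>
    intro _ x z R' heq
    cases x with
    | nil => simp at heq; exact Or.inl ⟨rfl, heq.symm⟩
    | cons c x' =>
      simp at heq
      right
      exact ⟨x', by simp [heq.1.symm], heq.2.symm⟩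
  | cons a g' ih =>
    intro hg x z R' heq
    cases x with
    | nil =>
      simp at heq
      exact absurd heq.1.symm (by intro hc; exact hg (by simp; exact Or.inl hc))
    | cons c x' =>
      simp at heq
      obtain ⟨hac, hrest⟩ := heq
      rcases ih (fun hm => hg (by simp [hm])) x' z R' hrest with ⟨h1, h2⟩ | ⟨x2, h1, h2⟩
      · left; exact ⟨by simp [hac, h1], h2⟩
      · right; exact ⟨x2, by simp [hac, h1], h2⟩

theorem inter_cons2 (g h : List Char) (t : List (List Char)) :
    [' '].intercalate (g :: h :: t) = g ++ ' ' :: [' '].intercalate (h :: t) := by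
  simp [List.intercalate, List.intersperse]

theorem inter_one (g : List Char) : [' '].intercalate [g] = g := by simp [List.intercalate]

theorem fwdLem : ∀ (gs : List (List Char)) (w : List Char), (∀ g ∈ gs, ' ' ∉ g) → w ≠ [] → ' ' ∉ w →
    (' ' :: w ++ [' ']) <:+: (' ' :: [' '].intercalate gs ++ [' ']) → w ∈ gs := by
  intro gs
  induction gs with
  | nil =>
    intro w _ hw _ hinf
    have := hinf.length_le
    simp [List.intercalate] at this
    exact absurd this (by cases w <;> simp_all)
  | cons g rest ih =>
    intro w hgs hw hsp hinf
    obtain ⟨x, y, hxy⟩ := hinf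
    have hg : ' ' ∉ g := hgs g (by simp)
    cases x with
    | nil =>
      simp only [List.nil_append] at hxy
      have hpre : w ++ [' '] <+: [' '].intercalate (g :: rest) ++ [' '] := by
        refine ⟨y, ?_⟩
        simpa using congrArg List.tail hxy
      cases rest with
      | nil =>
        rw [inter_one] at hpre
        have : w = g := pc w g [] hsp hg (by simpa using hpre)
        simp [this]
      | cons h t =>
        rw [inter_cons2] at hpre
        have : w = g := pc w g ([' '].intercalate (h :: t) ++ [' ']) hsp hg (by
          simpa using hpre)
        simp [this]
    | cons c x' =>
      have hc : c = ' ' := by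
        have := congrArg (fun l => l.head?) hxy
        simp at this
        exact this
      subst hc
      have hxy' : [' '].intercalate (g :: rest) ++ [' '] = x' ++ ' ' :: (w ++ [' '] ++ y) := by
        simpa using (congrArg List.tail hxy).symm
      cases rest with
      | nil =>
        rw [inter_one] at hxy'
        have hfs := firstSp g hg x' (w ++ [' '] ++ y) [] (by simpa using hxy')
        rcases hfs with ⟨_, hz⟩ | ⟨x2, _, hz⟩
        · exact absurd hz (by cases w <;> simp_all)
        · exact absurd hz (by simp)
      | cons h t =>
        rw [inter_cons2] at hxy'
        have hfs := firstSp g hg x' (w ++ [' '] ++ y) ([' '].intercalate (h :: t) ++ [' '])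
          (by simpa using hxy')
        rcases hfs with ⟨_, hz⟩ | ⟨x2, _, hz⟩
        · -- w ++ [' '] ++ y = intercalate (h::t) ++ [' ']  →  w = h
          have hpre : w ++ [' '] <+: [' '].intercalate (h :: t) ++ [' '] := ⟨y, by simpa using hz⟩
          cases t with
          | nil =>
            rw [inter_one] at hpre
            have : w = h := pc w h [] hsp (hgs h (by simp)) (by simpa using hpre)
            simp [this]
          | cons h2 t2 =>
            rw [inter_cons2] at hpre
            have : w = h := pc w h ([' '].intercalate (h2 :: t2) ++ [' ']) hsp (hgs h (by simp))
              (by simpa using hpre)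
            simp [this]
        · -- the occurrence lies inside the tail: recurse
          have hinf' : (' ' :: w ++ [' ']) <:+: (' ' :: [' '].intercalate (h :: t) ++ [' ']) := by
            refine ⟨' ' :: x2, y, ?_⟩
            simpa using congrArg (List.cons ' ') hz
          have := ih w (fun g' hg' => hgs g' (by simp [hg'])) hw hsp hinf'
          simp [this]

theorem bwdLem : ∀ (gs : List (List Char)) (w : List Char), w ∈ gs →
    (' ' :: w ++ [' ']) <:+: (' ' :: [' '].intercalate gs ++ [' ']) := by
  intro gs
  induction gs with
  | nil => intro w hw; simp at hw
  | cons g rest ih =>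
    intro w hw
    rcases List.mem_cons.mp hw with h | h
    · subst h
      cases rest with
      | nil => rw [inter_one]
      | cons h t =>
        rw [inter_cons2]
        refine ⟨[], [' '].intercalate (h :: t) ++ [' '], ?_⟩
        simp
    · have hi := ih w h
      cases rest with
      | nil => simp at h
      | cons h2 t2 =>
        rw [inter_cons2]
        exact hi.trans ⟨' ' :: g, [], by simp⟩

theorem core_iff (w cs : List Char) (hw : w ≠ []) (hsp : ' ' ∉ w) :
    (' ' :: w ++ [' ']) <:+: (' ' :: cs ++ [' ']) ↔ w ∈ List.splitOn ' ' cs := by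
  have hj : [' '].intercalate (List.splitOn ' ' cs) = cs := List.intercalate_splitOn cs ' '
  constructor
  · intro hinf
    exact fwdLem (List.splitOn ' ' cs) w (fun g hg => splitOn_spaceless cs g hg) hw hsp
      (by rw [hj]; exact hinf)
  · intro hmem
    have := bwdLem (List.splitOn ' ' cs) w hmem
    rwa [hj] at this

-- ---------- A's three-way test collapses to the padded-infix test ----------

theorem pad_toList (s : String) : (" " ++ s ++ " ").toList = ' ' :: s.toList ++ [' '] := by
  simp [String.toList_append]

theorem aCond_iff_infix (tl w : String) (hw : w.toList ≠ []) :
    aCond tl w = true ↔ (' ' :: w.toList ++ [' ']) <:+: (' ' :: tl.toList ++ [' ']) := by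
  unfold aCond
  simp only [Bool.or_eq_true, PySem.Str.isIn_iff_infix, pad_toList, beq_iff_eq,
    PySem.Str.startswith_eq, PySem.Chars.startswith_iff]
  constructor
  · rintro ((h | h) | h)
    · exact h
    · subst h; exact List.infix_rfl
    · rw [String.toList_append] at h
      obtain ⟨t, ht⟩ := h
      refine ⟨[], t ++ [' '], ?_⟩
      simp at ht ⊢
      rw [← ht]
      simp
  · intro h; exact Or.inl (Or.inl h)

theorem aCond_iff_mem (tl w : String) (hw : w.toList ≠ []) (hsp : ' ' ∉ w.toList) :
    aCond tl w = true ↔ w.toList ∈ List.splitOn ' ' tl.toList :=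
  (aCond_iff_infix tl w hw).trans (core_iff w.toList tl.toList hw hsp)

theorem aCond_eq_isIn (tl w : String) (hw : w.toList ≠ []) :
    aCond tl w = PySem.Str.isIn (" " ++ w ++ " ") (" " ++ tl ++ " ") := by
  by_cases h : (' ' :: w.toList ++ [' ']) <:+: (' ' :: tl.toList ++ [' '])
  · rw [(aCond_iff_infix tl w hw).mpr h]
    exact ((PySem.Str.isIn_iff_infix _ _).mpr (by simpa [pad_toList] using h)).symm
  · have h1 : aCond tl w = false := by
      rcases Bool.eq_false_or_eq_true (aCond tl w) with hb | hb
      · exact absurd ((aCond_iff_infix tl w hw).mp hb) h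
      · exact hb
    have h2 : PySem.Str.isIn (" " ++ w ++ " ") (" " ++ tl ++ " ") = false := by
      rcases Bool.eq_false_or_eq_true (PySem.Str.isIn (" " ++ w ++ " ") (" " ++ tl ++ " ")) with hb | hb
      · exact absurd (by simpa [pad_toList] using (PySem.Str.isIn_iff_infix _ _).mp hb) h
      · exact hb
    rw [h1, h2]

-- ---------- counting lemmas for B's fold over the token set ----------

theorem tokfold (f : String → List String) (c : String) : ∀ (ts : List String) (d : PySem.Dict String Int),
    (List.foldl (fun d tok => List.foldl (fun d c => d.modify c 0 (fun x => x + 1)) d (f tok)) d ts).getD c 0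
      = d.getD c 0 + ((ts.map (fun tok => (f tok).count c)).sum : Int) := by
  intro ts
  induction ts with
  | nil => intro d; simp
  | cons t ts ih =>
    intro d
    simp only [List.foldl_cons, List.map_cons, List.sum_cons]
    rw [ih, PySem.Dict.getD_foldl_modify_add_one]
    push_cast
    ring

theorem count_map_snd_filter : ∀ (wp : List (String × String)) (a c : String),
    ((wp.filter (fun p => p.1 == a)).map Prod.snd).count c
      = ((wp.filter (fun p => p.2 == c)).map Prod.fst).count a := by
  intro wp
  induction wp with
  | nil => simp
  | cons p rest ih =>
    intro a c
    by_cases h1 : p.1 = a <;> by_cases h2 : p.2 = c <;>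
      simp [List.filter_cons, h1, h2, List.count_cons, ih a c]

theorem sum_map_add_split (xs ys : List String) (x : String) :
    (ys.map (fun y => xs.count y + if x == y then 1 else 0)).sum
      = (ys.map (fun y => xs.count y)).sum + (ys.map (fun y => if x == y then 1 else 0)).sum := by
  induction ys with
  | nil => simp
  | cons y ys ihy => simp [ihy]; ring

theorem sum_map_ite_count (ys : List String) (x : String) :
    (ys.map (fun y => if x == y then 1 else 0)).sum = ys.count x := by
  rw [List.count_eq_countP]
  induction ys with
  | nil => simp
  | cons y ys ihy =>
    simp only [List.map_cons, List.sum_cons, List.countP_cons, ihy]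
    by_cases h : x = y
    · simp [h]; omega
    · have : (y == x) = false := by simp; exact fun hc => h hc.symm
      simp [h, this]

theorem sum_count_comm : ∀ (xs ys : List String),
    (xs.map (fun x => ys.count x)).sum = (ys.map (fun y => xs.count y)).sum := by
  intro xs
  induction xs with
  | nil => simp
  | cons x xs ih =>
    intro ys
    simp only [List.map_cons, List.sum_cons, ih ys, List.count_cons]
    rw [sum_map_add_split, sum_map_ite_count]
    omega

-- ---------- the token set of B ----------

theorem tks_map_toList (tl : String) :
    ∃ L, PySem.Str.split? tl " " = some L ∧ L.map String.toList = List.splitOn ' ' tl.toList := by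
  have h := PySem.Str.split?_map tl " "
  cases e : PySem.Str.split? tl " " with
  | none => rw [e] at h; simp [PySem.Chars.split?] at h
  | some L =>
    rw [e] at h
    refine ⟨L, rfl, ?_⟩
    simp [PySem.Chars.split?] at h
    rw [h]
    exact splitOn_char tl.toList

theorem mem_bToks (tl : String) (w : String) :
    (w ∈ bToks tl) ↔ w.toList ∈ List.splitOn ' ' tl.toList := by
  obtain ⟨L, hL, hmap⟩ := tks_map_toList tl
  unfold bToks
  rw [hL]
  rw [PySem.Set.mem_ofList]
  constructor
  · intro h
    rw [← hmap]
    exact List.mem_map_of_mem h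
  · intro h
    rw [← hmap] at h
    obtain ⟨x, hx, hxe⟩ := List.mem_map.mp h
    rwa [← String.toList_inj.mp hxe]

theorem nodup_bToks (tl : String) : (bToks tl).Nodup := PySem.Set.nodup_ofList _

-- ---------- evaluating the literal data ----------

def L7 : List String := ["wo", "fon", "yo", "ha", "sw", "fr", "en"]

set_option maxRecDepth 8192 in
theorem phrase_lit : bPhrasePairs = [("fon", "a ni")] := by decide

set_option maxRecDepth 8192 in
theorem wp_snd : ∀ p ∈ bWordPairs, p.2 ∈ L7 := by decide

-- the words credited to a language by B's index are exactly that language's space-free markers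
def Wc (c : String) : List String := (bWordPairs.filter (fun p => p.2 == c)).map Prod.fst

set_option maxRecDepth 8192 in
theorem Wc_wo : Wc "wo" = wolofWords := by decide
set_option maxRecDepth 8192 in
theorem Wc_fon : Wc "fon" = ["mi", "nyi", "kudo", "ka", "do", "wE", "gbE", "nado", "daxo",
  "alo", "azOn", "kpOn", "towe", "enyi", "e", "nukunnu", "hounnon", "avion"] := by decide
set_option maxRecDepth 8192 in
theorem Wc_yo : Wc "yo" = yorubaWords := by decide
set_option maxRecDepth 8192 in
theorem Wc_ha : Wc "ha" = hausaWords := by decide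
set_option maxRecDepth 8192 in
theorem Wc_sw : Wc "sw" = swahiliWords := by decide
set_option maxRecDepth 8192 in
theorem Wc_fr : Wc "fr" = frenchWords := by decide
set_option maxRecDepth 8192 in
theorem Wc_en : Wc "en" = englishWords := by decide

-- ---------- keys of B's score dict ----------

theorem keys_modfold {ν : Type} (cs : List String) (d : PySem.Dict String ν) (d0 : ν) (f : ν → ν)
    (h : ∀ c ∈ cs, c ∈ d.keys) :
    (List.foldl (fun d c => d.modify c d0 f) d cs).keys = d.keys := by
  induction cs generalizing d with
  | nil => rfl
  | cons c cs ih =>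
    have hc : (d.modify c d0 f).keys = d.keys := by
      rw [PySem.Dict.keys_modify, PySem.Dict.keys_insert_of_contains]
      exact (PySem.Dict.contains_iff_mem_keys d c).mpr (h c (by simp))
    simp only [List.foldl_cons]
    rw [ih _ (fun x hx => by rw [hc]; exact h x (by simp [hx]))]
    exact hc

theorem keys_bScores0 : bScores0.keys = L7 := by decide

theorem bIndex_getD (tok : String) :
    bIndex.getD tok [] = (bWordPairs.filter (fun p => p.1 == tok)).map Prod.snd := by
  unfold bIndex
  rw [PySem.Dict.getD_foldl_modify_append]
  simp [PySem.Dict.getD_empty]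

theorem bIndex_codes (tok : String) : ∀ c ∈ bIndex.getD tok [], c ∈ L7 := by
  intro c hc
  rw [bIndex_getD] at hc
  obtain ⟨p, hp, hpe⟩ := List.mem_map.mp hc
  exact hpe ▸ wp_snd p (List.mem_of_mem_filter hp)

theorem keys_bScores1 (tl : String) : (bScores1 tl).keys = L7 := by
  unfold bScores1
  have main : ∀ (ts : List String) (d : PySem.Dict String Int), d.keys = L7 →
      (List.foldl (fun d tok => List.foldl (fun d c => d.modify c 0 (fun x => x + 1)) d
        (bIndex.getD tok [])) d ts).keys = L7 := by
    intro ts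
    induction ts with
    | nil => intro d hd; exact hd
    | cons t ts ih =>
      intro d hd
      simp only [List.foldl_cons]
      apply ih
      rw [keys_modfold]
      · exact hd
      · intro c hc; rw [hd]; exact bIndex_codes t c hc
  exact main (bToks tl) bScores0 keys_bScores0

theorem keys_bScores2 (tl : String) : (bScores2 tl).keys = L7 := by
  unfold bScores2
  rw [phrase_lit]
  simp only [List.foldl_cons, List.foldl_nil]
  split
  · rw [PySem.Dict.keys_modify, PySem.Dict.keys_insert_of_contains, keys_bScores1]
    rw [PySem.Dict.contains_iff_mem_keys, keys_bScores1]
    decide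
  · exact keys_bScores1 tl

-- ---------- the per-key score equality ----------

theorem mapsum_congr (tl : String) (words : List String)
    (h : ∀ w ∈ words, w.toList ≠ [] ∧ ' ' ∉ w.toList) :
    (words.map (fun w => if aCond tl w then (1 : Int) else 0)).sum
      = (words.map (fun w => if w.toList ∈ List.splitOn ' ' tl.toList then (1 : Int) else 0)).sum := by
  congr 1
  apply List.map_congr_left
  intro w hw
  have := aCond_iff_mem tl w (h w hw).1 (h w hw).2
  by_cases hm : w.toList ∈ List.splitOn ' ' tl.toList
  · rw [if_pos (this.mpr hm), if_pos hm]
  · rw [if_neg (fun hb => hm (this.mp hb)), if_neg hm]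

set_option maxRecDepth 8192 in
theorem bScore_canon (tl c : String) :
    (bScores1 tl).getD c 0 = bScores0.getD c 0 +
      ((Wc c).map (fun w => if w.toList ∈ List.splitOn ' ' tl.toList then (1 : Int) else 0)).sum := by
  unfold bScores1
  rw [tokfold (fun tok => bIndex.getD tok []) c (bToks tl) bScores0]
  congr 1
  have h1 : ((bToks tl).map (fun tok => (bIndex.getD tok []).count c)).sum
      = ((bToks tl).map (fun tok => (Wc c).count tok)).sum := by
    congr 1
    apply List.map_congr_left
    intro tok _
    rw [bIndex_getD, count_map_snd_filter]
    rfl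
  rw [h1, sum_count_comm]
  have h2 : ((Wc c).map (fun w => (bToks tl).count w)).sum
      = ((Wc c).map (fun w => if w.toList ∈ List.splitOn ' ' tl.toList then (1 : Nat) else 0)).sum := by
    congr 1
    apply List.map_congr_left
    intro w _
    rw [List.Nodup.count (nodup_bToks tl)]
    by_cases hm : w ∈ bToks tl
    · rw [if_pos hm, if_pos ((mem_bToks tl w).mp hm)]
    · rw [if_neg hm, if_neg (fun hx => hm ((mem_bToks tl w).mpr hx))]
  rw [h2]
  rw [Nat.cast_list_sum]
  rw [List.map_map]
  congr 1
  apply List.map_congr_left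
  intro w _
  by_cases hm : w.toList ∈ List.splitOn ' ' tl.toList <;> simp [hm]

theorem bScores2_getD_ne_fon (tl c : String) (hc : c ≠ "fon") :
    (bScores2 tl).getD c 0 = (bScores1 tl).getD c 0 := by
  unfold bScores2
  rw [phrase_lit]
  simp only [List.foldl_cons, List.foldl_nil]
  split
  · exact PySem.Dict.getD_modify_of_ne _ _ _ hc
  · rfl

theorem bScores2_getD_fon (tl : String) :
    (bScores2 tl).getD "fon" 0 = (bScores1 tl).getD "fon" 0 +
      (if PySem.Str.isIn (" " ++ "a ni" ++ " ") (" " ++ tl ++ " ") then (1 : Int) else 0) := by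
  unfold bScores2
  rw [phrase_lit]
  simp only [List.foldl_cons, List.foldl_nil]
  split
  · rw [PySem.Dict.getD_modify_self]
  · ring

set_option maxRecDepth 8192 in
theorem aScores_getD (tl : String) :
    (aScores tl).getD "wo" 0 = aScore tl wolofWords ∧
    (aScores tl).getD "fon" 0 = aScore tl fonWords ∧
    (aScores tl).getD "yo" 0 = aScore tl yorubaWords ∧
    (aScores tl).getD "ha" 0 = aScore tl hausaWords ∧
    (aScores tl).getD "sw" 0 = aScore tl swahiliWords ∧
    (aScores tl).getD "fr" 0 = aScore tl frenchWords ∧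
    (aScores tl).getD "en" 0 = aScore tl englishWords := by
  refine ⟨?_, ?_, ?_, ?_, ?_, ?_, ?_⟩ <;>
    simp [aScores, PySem.Dict.getD, PySem.Dict.get?_mk_cons]

set_option maxRecDepth 8192 in
theorem words_ok_wo : ∀ w ∈ wolofWords, w.toList ≠ [] ∧ ' ' ∉ w.toList := by decide
set_option maxRecDepth 8192 in
theorem words_ok_yo : ∀ w ∈ yorubaWords, w.toList ≠ [] ∧ ' ' ∉ w.toList := by decide
set_option maxRecDepth 8192 in
theorem words_ok_ha : ∀ w ∈ hausaWords, w.toList ≠ [] ∧ ' ' ∉ w.toList := by decide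
set_option maxRecDepth 8192 in
theorem words_ok_sw : ∀ w ∈ swahiliWords, w.toList ≠ [] ∧ ' ' ∉ w.toList := by decide
set_option maxRecDepth 8192 in
theorem words_ok_fr : ∀ w ∈ frenchWords, w.toList ≠ [] ∧ ' ' ∉ w.toList := by decide
set_option maxRecDepth 8192 in
theorem words_ok_en : ∀ w ∈ englishWords, w.toList ≠ [] ∧ ' ' ∉ w.toList := by decide
def fonA : List String := ["mi", "nyi", "kudo", "ka", "do", "wE", "gbE", "nado"]
def fonB : List String := ["daxo", "alo", "azOn", "kpOn", "towe", "enyi", "e", "nukunnu", "hounnon", "avion"]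

theorem key_eq (tl : String) (k : String) :
    (aScores tl).getD k 0 = (bScores2 tl).getD k 0 := by
  by_cases hk : k ∈ L7
  · simp only [L7, List.mem_cons, List.not_mem_nil, or_false] at hk
    rcases hk with rfl | rfl | rfl | rfl | rfl | rfl | rfl
    · rw [(aScores_getD tl).1, bScores2_getD_ne_fon tl _ (by decide), bScore_canon, Wc_wo,
        (by decide : bScores0.getD "wo" 0 = 0)]
      unfold aScore
      rw [mapsum_congr tl wolofWords words_ok_wo]
      ring
    · rw [(aScores_getD tl).2.1, bScores2_getD_fon tl, bScore_canon tl "fon", Wc_fon,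
        (by decide : bScores0.getD "fon" 0 = 0)]
      have hsplit : fonWords = fonA ++ "a ni" :: fonB := by decide
      have hw : (fonA ++ fonB : List String)
          = ["mi", "nyi", "kudo", "ka", "do", "wE", "gbE", "nado", "daxo",
             "alo", "azOn", "kpOn", "towe", "enyi", "e", "nukunnu", "hounnon", "avion"] := by decide
      unfold aScore
      rw [hsplit, ← hw, List.map_append, List.sum_append, List.map_cons, List.sum_cons,
        List.map_append, List.sum_append,
        aCond_eq_isIn tl "a ni" (by decide),
        mapsum_congr tl fonA (by decide), mapsum_congr tl fonB (by decide)]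
      ring
    · rw [(aScores_getD tl).2.2.1, bScores2_getD_ne_fon tl _ (by decide), bScore_canon, Wc_yo,
        (by decide : bScores0.getD "yo" 0 = 0)]
      unfold aScore
      rw [mapsum_congr tl yorubaWords words_ok_yo]
      ring
    · rw [(aScores_getD tl).2.2.2.1, bScores2_getD_ne_fon tl _ (by decide), bScore_canon, Wc_ha,
        (by decide : bScores0.getD "ha" 0 = 0)]
      unfold aScore
      rw [mapsum_congr tl hausaWords words_ok_ha]
      ring
    · rw [(aScores_getD tl).2.2.2.2.1, bScores2_getD_ne_fon tl _ (by decide), bScore_canon, Wc_sw,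
        (by decide : bScores0.getD "sw" 0 = 0)]
      unfold aScore
      rw [mapsum_congr tl swahiliWords words_ok_sw]
      ring
    · rw [(aScores_getD tl).2.2.2.2.2.1, bScores2_getD_ne_fon tl _ (by decide), bScore_canon, Wc_fr,
        (by decide : bScores0.getD "fr" 0 = 0)]
      unfold aScore
      rw [mapsum_congr tl frenchWords words_ok_fr]
      ring
    · rw [(aScores_getD tl).2.2.2.2.2.2, bScores2_getD_ne_fon tl _ (by decide), bScore_canon, Wc_en,
        (by decide : bScores0.getD "en" 0 = 0)]
      unfold aScore
      rw [mapsum_congr tl englishWords words_ok_en]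
      ring
  · have ha : (aScores tl).getD k 0 = 0 := by
      apply PySem.Dict.getD_of_not_contains
      rcases Bool.eq_false_or_eq_true ((aScores tl).contains k) with hb | hb
      · exact absurd (by
          have hm := (PySem.Dict.contains_iff_mem_keys _ k).mp hb
          rwa [show (aScores tl).keys = L7 from rfl] at hm) hk
      · exact hb
    have hbz : (bScores2 tl).getD k 0 = 0 := by
      apply PySem.Dict.getD_of_not_contains
      rcases Bool.eq_false_or_eq_true ((bScores2 tl).contains k) with hb | hb
      · exact absurd (by
          have := (PySem.Dict.contains_iff_mem_keys _ k).mp hb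
          rwa [keys_bScores2] at this) hk
      · exact hb
    rw [ha, hbz]

-- ===== VERDICT (by name: the statement is the Claim_ definition above) =====
theorem detect_language_extended_spec : Claim_equal_detect_language_extended := by
  intro text _
  unfold Spec_detect_language_extended detect_language_extended detect_language_extended_alt
  set s := PySem.Str.strip (PySem.Str.lower text) with hs
  have hg : ∀ k, (aScores s).getD k 0 = (bScores2 s).getD k 0 := key_eq s
  have hkeys : (aScores s).keys = (bScores2 s).keys := by rw [keys_bScores2]; rfl
  have hmax : PySem.List.max? (aScores s).keys (fun k => (aScores s).getD k 0)
      = PySem.List.max? (bScores2 s).keys (fun k => (bScores2 s).getD k 0) := by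
    rw [hkeys]; exact congrArg _ (funext hg)
  show (match PySem.List.max? (aScores s).keys (fun k => (aScores s).getD k 0) with
    | some best => if (aScores s).getD best 0 = 0 then "fr" else best
    | none => "fr") =
    (match PySem.List.max? (bScores2 s).keys (fun k => (bScores2 s).getD k 0) with
    | some best => if (bScores2 s).getD best 0 = 0 then "fr" else best
    | none => "fr")
  rw [hmax]
  cases PySem.List.max? (bScores2 s).keys (fun k => (bScores2 s).getD k 0) with
  | none => rfl
  | some best => dsimp only; rw [hg best]
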